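-- pv_equiv track=rewrite | github.com/fall-out-bug/sdp | src/sdp-deprecated/validators/ws_template_checker.py | _check_code_blocks
-- ===== SOURCE A (Python) =====
-- MAX_CODE_BLOCK_LINES: int = 30
--
-- def _check_code_blocks(lines: list[str]) -> tuple[list[str], list[str]]:
--     """Check code block sizes. Returns (violations, warnings)."""
--     violations: list[str] = []
--     warnings: list[str] = []
--     in_code_block = False
--     code_block_lines = 0
--     code_block_start = 0
--     has_not_implemented = False
--
--     for i, line in enumerate(lines, 1):
--         if line.strip().startswith("```"):
--             if in_code_block:
--                 if code_block_lines > MAX_CODE_BLOCK_LINES: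
--                     msg = (
--                         f"Code block too large at line {code_block_start}: "
--                         f"{code_block_lines} lines (max {MAX_CODE_BLOCK_LINES})"
--                     )
--                     violations.append(msg)
--                 if code_block_lines > 10 and not has_not_implemented:
--                     msg = (
--                         f"Large code block at line {code_block_start} without "
--                         "'raise NotImplementedError' - may contain full implementation"
--                     )
--                     warnings.append(msg)
--                 in_code_block = False
--                 code_block_lines = 0
--                 has_not_implemented = False
--             else:
--                 in_code_block = True
--                 code_block_start = i
--         elif in_code_block:
--             code_block_lines += 1
--             if "NotImplementedError" in line or "raise NotImplementedError" in line:
--                 has_not_implemented = True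
--
--     return violations, warnings
-- ===== SOURCE B (Python) =====
-- MAX_CODE_BLOCK_LINES: int = 30
--
--
-- def _check_code_blocks(lines: list[str]) -> tuple[list[str], list[str]]:
--     """Check code block sizes. Returns (violations, warnings)."""
--     fence_at = [i for i, line in enumerate(lines) if line.strip().startswith("```")]
--     blocks = [(fence_at[k] + 1, lines[fence_at[k] + 1:fence_at[k + 1]])
--               for k in range(0, len(fence_at) - 1, 2)]
--     violations = [
--         f"Code block too large at line {start}: {len(body)} lines "
--         f"(max {MAX_CODE_BLOCK_LINES})"
--         for start, body in blocks if len(body) > MAX_CODE_BLOCK_LINES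
--     ]
--     warnings = [
--         f"Large code block at line {start} without "
--         "'raise NotImplementedError' - may contain full implementation"
--         for start, body in blocks
--         if len(body) > 10 and not any("NotImplementedError" in ln for ln in body)
--     ]
--     return violations, warnings
-- ===== Notes on version B (the rewrite author's own statement) =====
-- stated objective: alternative
-- what changed: A is a single-pass state machine with in-block counters and flags emitting messages on each closing fence; B first lists the fence line indices, pairs them up (ignoring a trailing unpaired fence), takes the slice between each pair as the block body, and builds violations and warnings as two separate comprehensions over this block list.
import Mathlib
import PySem

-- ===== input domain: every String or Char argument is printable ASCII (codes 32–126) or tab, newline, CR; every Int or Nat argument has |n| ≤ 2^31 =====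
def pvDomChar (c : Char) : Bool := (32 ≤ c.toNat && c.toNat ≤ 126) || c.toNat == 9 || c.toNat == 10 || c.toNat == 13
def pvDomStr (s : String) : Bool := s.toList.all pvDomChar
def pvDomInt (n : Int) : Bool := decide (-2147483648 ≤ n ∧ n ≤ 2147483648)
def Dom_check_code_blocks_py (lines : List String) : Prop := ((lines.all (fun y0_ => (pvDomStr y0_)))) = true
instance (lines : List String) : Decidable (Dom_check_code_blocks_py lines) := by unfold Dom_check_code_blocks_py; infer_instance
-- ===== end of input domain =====

-- B re-decomposes A's one-pass state machine into: collect fence indices, pair them, then two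
-- comprehensions over the closed blocks (alternative decomposition, same asymptotic cost).

-- shared helpers: fence test and the two message formats (identical f-strings in both Pythons)
def pvFence (l : String) : Bool := PySem.Str.startswith (PySem.Str.strip l) "```"

def pvMsgV (s cnt : Int) : String :=
  "Code block too large at line " ++ PySem.Int.toStr s ++ ": " ++ PySem.Int.toStr cnt ++ " lines (max 30)"

def pvMsgW (s : Int) : String :=
  "Large code block at line " ++ PySem.Int.toStr s ++ " without 'raise NotImplementedError' - may contain full implementation"

-- ===== PORT A =====
-- the for-loop as structural recursion over the same state
-- (i, violations, warnings, in_code_block, code_block_lines, code_block_start, has_not_implemented)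
def pvLoopA : List String → Int → List String → List String → Bool → Int → Int → Bool → List String × List String
  | [], _, viol, warn, _, _, _, _ => (viol, warn)
  | l :: rest, i, viol, warn, inb, cnt, start, hni =>
    if pvFence l then
      if inb then
        let viol' := if cnt > 30 then viol ++ [pvMsgV start cnt] else viol
        let warn' := if cnt > 10 ∧ hni = false then warn ++ [pvMsgW start] else warn
        pvLoopA rest (i + 1) viol' warn' false 0 start false
      else
        pvLoopA rest (i + 1) viol warn true cnt i hni
    else
      if inb then
        pvLoopA rest (i + 1) viol warn true (cnt + 1) start
          (hni || (PySem.Str.isIn "NotImplementedError" l || PySem.Str.isIn "raise NotImplementedError" l))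
      else
        pvLoopA rest (i + 1) viol warn false cnt start hni

def check_code_blocks_py (lines : List String) : List String × List String :=
  pvLoopA lines 1 [] [] false 0 0 false

-- ===== PORT B =====
def check_code_blocks_py_alt (lines : List String) : List String × List String :=
  let fenceAt : List Int := ((PySem.List.enumerate lines 0).filter (fun p => pvFence p.2)).map (fun p => p.1)
  -- fence_at[k] / fence_at[k+1]: every k produced by the range keeps both lookups in bounds,
  -- so the pyGetD default is never used (exact for Source B's fence_at[k])
  let blocks : List (Int × List String) :=
    (PySem.List.pyRange 0 ((fenceAt.length : Int) - 1) 2).map (fun k =>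
      (PySem.List.pyGetD fenceAt k 0 + 1,
       PySem.List.slice lines (some (PySem.List.pyGetD fenceAt k 0 + 1)) (some (PySem.List.pyGetD fenceAt (k + 1) 0))))
  let violations : List String :=
    (blocks.filter (fun b => decide (((b.2.length : Int)) > 30))).map (fun b => pvMsgV b.1 (b.2.length : Int))
  let warnings : List String :=
    (blocks.filter (fun b => decide (((b.2.length : Int)) > 10) && !(b.2.any (fun ln => PySem.Str.isIn "NotImplementedError" ln)))).map
      (fun b => pvMsgW b.1)
  (violations, warnings)

-- ===== PRECONDITION & SPEC =====
def Spec_check_code_blocks_py (lines : List String) (out : List String × List String) : Prop := out = check_code_blocks_py_alt lines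
instance (lines : List String) (out : List String × List String) : Decidable (Spec_check_code_blocks_py lines out) := by unfold Spec_check_code_blocks_py; infer_instance

-- ===== CLAIM (what is proved, stated in full; the proofs are below) =====
def Claim_equal_check_code_blocks_py : Prop := ∀ (lines : List String), Dom_check_code_blocks_py lines → Spec_check_code_blocks_py lines (check_code_blocks_py lines)

-- ===== LEMMAS AND PROOFS =====

-- proof-side spec: the list of closed code blocks as (opening line number, body lines)
def pvNI (l : String) : Bool := PySem.Str.isIn "NotImplementedError" l

mutual
def pvBlk : List String → Int → List (Int × List String)
  | [], _ => []
  | l :: rest, i => if pvFence l then pvInB rest (i + 1) i [] else pvBlk rest (i + 1)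
def pvInB : List String → Int → Int → List String → List (Int × List String)
  | [], _, _, _ => []
  | l :: rest, i, s, acc => if pvFence l then (s, acc) :: pvBlk rest (i + 1) else pvInB rest (i + 1) s (acc ++ [l])
end

-- B's phase 2, as a function of a block list
def pvEmitV (bs : List (Int × List String)) : List String :=
  (bs.filter (fun b => decide (((b.2.length : Int)) > 30))).map (fun b => pvMsgV b.1 (b.2.length : Int))

def pvEmitW (bs : List (Int × List String)) : List String :=
  (bs.filter (fun b => decide (((b.2.length : Int)) > 10) && !(b.2.any pvNI))).map
    (fun b => pvMsgW b.1)

-- 0-based indices of fence lines, recursively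
def pvF : List String → List Nat
  | [] => []
  | l :: rest => if pvFence l then 0 :: (pvF rest).map (· + 1) else (pvF rest).map (· + 1)

-- consecutive pairing, dropping a trailing unpaired element
def pvPairs : List Nat → List (Nat × Nat)
  | a :: b :: rest => (a, b) :: pvPairs rest
  | _ => []

-- body of a block delimited by fence indices p.1 < p.2
def pvBody (lines : List String) (p : Nat × Nat) : List String :=
  (lines.drop (p.1 + 1)).take (p.2 - (p.1 + 1))

lemma pvNI_absorb (l : String) :
    (PySem.Str.isIn "NotImplementedError" l || PySem.Str.isIn "raise NotImplementedError" l) = pvNI l := by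
  unfold pvNI
  cases h : PySem.Str.isIn "NotImplementedError" l with
  | true => simp
  | false =>
    simp only [Bool.false_or]
    cases h2 : PySem.Str.isIn "raise NotImplementedError" l with
    | false => rfl
    | true =>
      exfalso
      have hinf : "raise NotImplementedError".toList <:+: l.toList := (PySem.Str.isIn_iff_infix _ _).1 h2
      have hsub : "NotImplementedError".toList <:+: "raise NotImplementedError".toList := by decide
      have h3 : PySem.Str.isIn "NotImplementedError" l = true :=
        (PySem.Str.isIn_iff_infix _ _).2 (hsub.trans hinf)
      rw [h3] at h
      cases h

lemma pvEmitV_cons (s : Int) (acc : List String) (bs : List (Int × List String)) :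
    pvEmitV ((s, acc) :: bs)
      = (if ((acc.length : Int)) > 30 then [pvMsgV s (acc.length : Int)] else []) ++ pvEmitV bs := by
  simp only [pvEmitV, List.filter_cons]
  split_ifs with h <;> simp_all

lemma pvEmitW_cons (s : Int) (acc : List String) (bs : List (Int × List String)) :
    pvEmitW ((s, acc) :: bs)
      = (if ((acc.length : Int)) > 10 ∧ acc.any pvNI = false then [pvMsgW s] else []) ++ pvEmitW bs := by
  simp only [pvEmitW, List.filter_cons]
  cases hb : acc.any pvNI with
  | false =>
    by_cases hl : ((acc.length : Int)) > 10
    · simp [hl]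
    · simp [hl]
  | true => simp

-- A's loop, characterised by the block-list spec (both loop modes at once)
lemma loopA_char : ∀ (lines : List String) (i : Int) (V W : List String),
    (∀ s : Int, pvLoopA lines i V W false 0 s false
        = (V ++ pvEmitV (pvBlk lines i), W ++ pvEmitW (pvBlk lines i)))
  ∧ (∀ (s : Int) (acc : List String), pvLoopA lines i V W true (acc.length : Int) s (acc.any pvNI)
        = (V ++ pvEmitV (pvInB lines i s acc), W ++ pvEmitW (pvInB lines i s acc))) := by
  intro lines
  induction lines with
  | nil => intro i V W; constructor <;> intro s <;>
      simp [pvLoopA, pvBlk, pvInB, pvEmitV, pvEmitW]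
  | cons l rest ih =>
    intro i V W
    constructor
    · intro s
      by_cases hf : pvFence l = true
      · simp only [pvLoopA, hf, if_true, Bool.false_eq_true, if_false, pvBlk]
        have h2 := (ih (i + 1) V W).2 i []
        simpa using h2
      · simp only [pvLoopA, hf, if_false, Bool.false_eq_true, pvBlk]
        exact (ih (i + 1) V W).1 s
    · intro s acc
      by_cases hf : pvFence l = true
      · simp only [pvLoopA, hf, if_true, pvInB]
        rw [pvEmitV_cons, pvEmitW_cons]
        rw [(ih (i + 1) (if ((acc.length : Int)) > 30 then V ++ [pvMsgV s (acc.length : Int)] else V)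
              (if ((acc.length : Int)) > 10 ∧ acc.any pvNI = false then W ++ [pvMsgW s] else W)).1 s]
        split_ifs <;> simp [List.append_assoc]
      · simp only [pvLoopA, hf, if_false, Bool.false_eq_true, if_true, pvInB]
        have harg : (acc.any pvNI ||
            (PySem.Str.isIn "NotImplementedError" l || PySem.Str.isIn "raise NotImplementedError" l))
            = (acc ++ [l]).any pvNI := by
          rw [pvNI_absorb]; simp
        have hlen : ((acc.length : Int)) + 1 = (((acc ++ [l]).length : Nat) : Int) := by
          simp
        rw [harg, hlen]
        exact (ih (i + 1) V W).2 s (acc ++ [l])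

lemma A_char (lines : List String) :
    check_code_blocks_py lines = (pvEmitV (pvBlk lines 1), pvEmitW (pvBlk lines 1)) := by
  unfold check_code_blocks_py
  simpa using (loopA_char lines 1 [] []).1 0

-- B side --------------------------------------------------------------------

lemma pvPairs_map_add (c : Nat) : ∀ ns : List Nat,
    pvPairs (ns.map (· + c)) = (pvPairs ns).map (fun p => (p.1 + c, p.2 + c)) := by
  intro ns
  induction ns using pvPairs.induct with
  | case1 a b rest ih => simp [pvPairs, ih]
  | case2 x h =>
    match x, h with
    | [], _ => rfl
    | [a], _ => rfl
    | a :: b :: t, h => exact absurd rfl (fun hh => h a b t hh)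

lemma pvPairs_nil_or_single (x : List Nat) (h : ∀ (a b : Nat) (rest : List Nat), x = a :: b :: rest → False) :
    pvPairs x = [] := by
  match x with
  | [] => rfl
  | [a] => rfl
  | a :: b :: t => exact absurd rfl (fun hh => h a b t hh)

lemma pyRange_pairs (n : Nat) :
    PySem.List.pyRange 0 ((n : Int) - 1) 2 = (List.range (n / 2)).map (fun k => ((2 * k : Nat) : Int)) := by
  rw [PySem.List.pyRange_of_pos 0 ((n : Int) - 1) (by norm_num)]
  have hcount : (if (0:Int) < (n : Int) - 1 then (((n : Int) - 1 - 0 + 2 - 1) / 2).toNat else 0) = n / 2 := by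
    split_ifs with h <;> omega
  rw [hcount]
  apply List.map_congr_left
  intro k _
  push_cast
  ring

lemma range_pairs {β : Type} (G : Nat → Nat → β) : ∀ ns : List Nat,
    (List.range (ns.length / 2)).map (fun k => G (ns.getD (2 * k) 0) (ns.getD (2 * k + 1) 0))
      = (pvPairs ns).map (fun p => G p.1 p.2) := by
  intro ns
  induction ns using pvPairs.induct with
  | case1 a b t ih =>
    have hlen : (a :: b :: t).length / 2 = t.length / 2 + 1 := by simp; omega
    rw [hlen, List.range_succ_eq_map]
    rw [show pvPairs (a :: b :: t) = (a, b) :: pvPairs t from rfl]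
    simp only [List.map_cons, List.map_map]
    congr 1
  | case2 x h =>
    rw [pvPairs_nil_or_single x h]
    have hl : x.length / 2 = 0 := by
      match x, h with
      | [], _ => rfl
      | [a], _ => simp
      | a :: b :: t, h => exact absurd rfl (fun hh => h a b t hh)
    rw [hl]
    rfl

lemma pvF_enum : ∀ (lines : List String) (s : Int),
    ((PySem.List.enumerate lines s).filter (fun p => pvFence p.2)).map (fun p => p.1)
      = (pvF lines).map (fun n : Nat => (n : Int) + s) := by
  intro lines
  induction lines with
  | nil => intro s; simp [pvF, PySem.List.enumerate_nil]
  | cons l rest ih =>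
    intro s
    rw [PySem.List.enumerate_cons]
    simp only [List.filter_cons]
    by_cases hf : pvFence l = true
    · rw [if_pos hf, pvF, if_pos hf]
      simp only [List.map_cons, ih (s + 1), List.map_map]
      congr 1
      · simp
      · apply List.map_congr_left
        intro n _
        simp only [Function.comp_apply]
        push_cast
        ring
    · rw [if_neg hf, pvF, if_neg hf, ih (s + 1), List.map_map]
      apply List.map_congr_left
      intro n _
      simp only [Function.comp_apply]
      push_cast
      ring

lemma pvF_head : ∀ (xs : List String) (f : Nat) (F' : List Nat), pvF xs = f :: F' →
    F' = (pvF (xs.drop (f + 1))).map (· + (f + 1)) := by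
  intro xs
  induction xs with
  | nil => intro f F' h; simp [pvF] at h
  | cons l rest ih =>
    intro f F' h
    by_cases hf : pvFence l = true
    · rw [pvF, if_pos hf] at h
      injection h with h1 h2
      subst h1
      subst h2
      simp
    · rw [pvF, if_neg hf] at h
      cases hr : pvF rest with
      | nil => rw [hr] at h; simp at h
      | cons f' G =>
        rw [hr] at h
        simp only [List.map_cons] at h
        injection h with h1 h2
        subst h1
        subst h2
        rw [ih f' G hr]
        simp only [List.map_map, List.drop_succ_cons]
        rw [show f' + 1 + 1 = f' + 2 from rfl]
        apply List.map_congr_left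
        intro n _
        simp only [Function.comp_apply]
        omega

lemma pvF_nil_inb : ∀ (xs : List String), pvF xs = [] → ∀ (i s : Int) (acc : List String), pvInB xs i s acc = [] := by
  intro xs
  induction xs with
  | nil => intro _ i s acc; rfl
  | cons l rest ih =>
    intro h i s acc
    by_cases hf : pvFence l = true
    · rw [pvF, if_pos hf] at h; simp at h
    · rw [pvF, if_neg hf] at h
      simp only [List.map_eq_nil_iff] at h
      rw [pvInB, if_neg hf]
      exact ih h _ _ _

set_option maxHeartbeats 1000000 in
lemma main_char (n : Nat) : ∀ lines : List String, lines.length ≤ n →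
    (∀ i : Int, pvBlk lines i = (pvPairs (pvF lines)).map (fun p => (i + (p.1 : Int), pvBody lines p)))
  ∧ (∀ (i s : Int) (acc : List String) (f : Nat) (F' : List Nat), pvF lines = f :: F' →
      pvInB lines i s acc = (s, acc ++ lines.take f) :: pvBlk (lines.drop (f + 1)) (i + (f : Int) + 1)) := by
  induction n with
  | zero =>
    intro lines hlen
    have h0 : lines = [] := List.eq_nil_of_length_eq_zero (Nat.le_zero.mp hlen)
    subst h0
    refine ⟨fun i => rfl, fun i s acc f F' h => ?_⟩
    simp [pvF] at h
  | succ n ihn =>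
    intro lines hlen
    cases lines with
    | nil =>
      refine ⟨fun i => rfl, fun i s acc f F' h => ?_⟩
      simp [pvF] at h
    | cons l rest =>
      have hr : rest.length ≤ n := by simp at hlen; omega
      constructor
      · intro i
        by_cases hf : pvFence l = true
        · rw [pvBlk, if_pos hf]
          cases hF : pvF rest with
          | nil =>
            rw [pvF_nil_inb rest hF, pvF, if_pos hf, hF]
            simp [pvPairs]
          | cons f F' =>
            have hdl : (rest.drop (f + 1)).length ≤ n := by
              have := List.length_drop (l := rest) (i := f + 1)
              omega
            rw [(ihn rest hr).2 (i + 1) i [] f F' hF]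
            rw [(ihn (rest.drop (f + 1)) hdl).1 (i + 1 + (f : Int) + 1)]
            rw [pvF, if_pos hf, hF]
            simp only [List.map_cons]
            rw [show pvPairs (0 :: (f + 1) :: (F'.map (· + 1))) = (0, f + 1) :: pvPairs (F'.map (· + 1)) from rfl]
            have hS := pvF_head rest f F' hF
            rw [hS]
            rw [show ((pvF (rest.drop (f + 1))).map (· + (f + 1))).map (· + 1)
                  = (pvF (rest.drop (f + 1))).map (· + (f + 2)) from by
              rw [List.map_map]; apply List.map_congr_left; intro m _; simp only [Function.comp_apply]; omega]
            rw [pvPairs_map_add (f + 2) (pvF (rest.drop (f + 1)))]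
            simp only [List.map_cons, List.map_map]
            congr 1
            · simp [pvBody]
            · apply List.map_congr_left
              intro p _
              simp only [Function.comp_apply]
              apply Prod.ext
              · push_cast; ring
              · simp only [pvBody, List.drop_drop, List.drop_succ_cons]
                congr 1
                · omega
                · congr 1
                  omega
        · rw [pvBlk, if_neg hf, (ihn rest hr).1 (i + 1)]
          rw [pvF, if_neg hf, pvPairs_map_add 1 (pvF rest)]
          simp only [List.map_map]
          apply List.map_congr_left
          intro p _
          simp only [Function.comp_apply]
          apply Prod.ext
          · push_cast; ring
          · simp only [pvBody, List.drop_succ_cons]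
            congr 1
            omega
      · intro i s acc f F' hF
        by_cases hf : pvFence l = true
        · rw [pvF, if_pos hf] at hF
          obtain ⟨h1, h2⟩ := List.cons_eq_cons.mp hF
          subst h1
          rw [pvInB, if_pos hf]
          simp
        · rw [pvF, if_neg hf] at hF
          cases hFr : pvF rest with
          | nil => rw [hFr] at hF; simp at hF
          | cons f0 G =>
            rw [hFr] at hF
            simp only [List.map_cons] at hF
            obtain ⟨h1, h2⟩ := List.cons_eq_cons.mp hF
            subst h1
            rw [pvInB, if_neg hf, (ihn rest hr).2 (i + 1) s (acc ++ [l]) f0 G hFr]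
            rw [List.take_succ_cons, List.drop_succ_cons]
            congr 1
            · simp
            · congr 1
              push_cast
              ring

lemma getD_cast (F : List Nat) (n : Nat) :
    (F.map (fun m : Nat => (m : Int))).getD n 0 = ((F.getD n 0 : Nat) : Int) := by
  cases h : F[n]? <;> simp [List.getD_eq_getElem?_getD, h]

lemma B_blocks (lines : List String) :
    (PySem.List.pyRange 0 (((((PySem.List.enumerate lines 0).filter (fun p => pvFence p.2)).map (fun p => p.1)).length : Int) - 1) 2).map (fun k =>
      (PySem.List.pyGetD (((PySem.List.enumerate lines 0).filter (fun p => pvFence p.2)).map (fun p => p.1)) k 0 + 1,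
       PySem.List.slice lines (some (PySem.List.pyGetD (((PySem.List.enumerate lines 0).filter (fun p => pvFence p.2)).map (fun p => p.1)) k 0 + 1))
         (some (PySem.List.pyGetD (((PySem.List.enumerate lines 0).filter (fun p => pvFence p.2)).map (fun p => p.1)) (k + 1) 0))))
    = pvBlk lines 1 := by
  have hfa : ((PySem.List.enumerate lines 0).filter (fun p => pvFence p.2)).map (fun p => p.1)
      = (pvF lines).map (fun n : Nat => (n : Int)) := by
    rw [pvF_enum lines 0]
    apply List.map_congr_left
    intro n _
    simp
  rw [hfa]
  rw [show (((pvF lines).map (fun n : Nat => (n : Int))).length : Int) = ((pvF lines).length : Int) from by simp]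
  rw [pyRange_pairs (pvF lines).length, List.map_map]
  have hpt : ∀ k : Nat,
      ((fun k : Int => (PySem.List.pyGetD ((pvF lines).map (fun n : Nat => (n : Int))) k 0 + 1,
        PySem.List.slice lines (some (PySem.List.pyGetD ((pvF lines).map (fun n : Nat => (n : Int))) k 0 + 1))
          (some (PySem.List.pyGetD ((pvF lines).map (fun n : Nat => (n : Int))) (k + 1) 0)))) ∘ (fun k : Nat => ((2 * k : Nat) : Int))) k
      = (fun a b => (((a : Nat) : Int) + 1, pvBody lines (a, b))) ((pvF lines).getD (2 * k) 0) ((pvF lines).getD (2 * k + 1) 0) := by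
    intro k
    simp only [Function.comp_apply]
    have e1 : PySem.List.pyGetD ((pvF lines).map (fun n : Nat => (n : Int))) ((2 * k : Nat) : Int) 0
        = (((pvF lines).getD (2 * k) 0 : Nat) : Int) := by
      rw [PySem.List.pyGetD_natCast, getD_cast]
    have e2 : PySem.List.pyGetD ((pvF lines).map (fun n : Nat => (n : Int))) (((2 * k : Nat) : Int) + 1) 0
        = (((pvF lines).getD (2 * k + 1) 0 : Nat) : Int) := by
      rw [show (((2 * k : Nat) : Int) + 1) = ((2 * k + 1 : Nat) : Int) from by push_cast; ring,
          PySem.List.pyGetD_natCast, getD_cast]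
    rw [e1, e2]
    rw [show ((((pvF lines).getD (2 * k) 0 : Nat) : Int) + 1) = (((pvF lines).getD (2 * k) 0 + 1 : Nat) : Int) from by push_cast; ring]
    rw [PySem.List.slice_natCast]
    rfl
  rw [List.map_congr_left (fun k _ => hpt k)]
  rw [range_pairs (fun a b => (((a : Nat) : Int) + 1, pvBody lines (a, b))) (pvF lines)]
  rw [(main_char lines.length lines (le_refl _)).1 1]
  apply List.map_congr_left
  intro p _
  rw [Int.add_comm]

lemma B_char (lines : List String) :
    check_code_blocks_py_alt lines = (pvEmitV (pvBlk lines 1), pvEmitW (pvBlk lines 1)) := by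
  simp only [check_code_blocks_py_alt]
  rw [B_blocks lines]
  rfl

-- ===== VERDICT (by name: the statement is the Claim_ definition above) =====
theorem check_code_blocks_py_spec : Claim_equal_check_code_blocks_py := by
  intro lines _
  unfold Spec_check_code_blocks_py
  rw [A_char, B_char]
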